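-- pv_equiv track=rewrite | github.com/robpkelly/pyGSTi | packages/pygsti/util/listtools.py | compute_occurrence_indices
-- ===== SOURCE A (Python) =====
-- def compute_occurrence_indices(lst):
--     """
--     Returns a 0-based list of integers specifying which occurrence,
--     i.e. enumerated duplicate, each list item is.
--
--     For example, if `lst` = [ 'A','B','C','C','A'] then the
--     returned list will be   [  0 , 0 , 0 , 1 , 1 ].  This is useful
--     when working with `DataSet` objects that have `collisionAction`
--     set to "keepseparate".
--
--     Parameters
--     ----------
--     lst : list
--         The list to process.
--
--     Returns
--     -------
--     list
--     """
--     lookup = {}; ret = []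
--     for x in lst:
--         if x not in lookup:
--             lookup[x] = 0
--         else:
--             lookup[x] += 1
--         ret.append( lookup[x] )
--     return ret
-- ===== SOURCE B (Python) =====
-- def compute_occurrence_indices(lst):
--     # two-pass: build an index table value -> positions, then scatter occurrence ranks
--     positions = {}
--     for i, x in enumerate(lst):
--         positions.setdefault(x, []).append(i)
--     ret = [0] * len(lst)
--     for poss in positions.values():
--         for rank, i in enumerate(poss):
--             ret[i] = rank
--     return ret
-- ===== Notes on version B (the rewrite author's own statement) =====
-- stated objective: alternative
-- what changed: A's single interleaved pass (counter dict updated and read per element, result appended inline) becomes a build-table-then-scatter two-pass structure: first pass groups the positions of each distinct value into an index table, second pass writes each group's occurrence ranks (0,1,2,...) back into a preallocated result list.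
import Mathlib
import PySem

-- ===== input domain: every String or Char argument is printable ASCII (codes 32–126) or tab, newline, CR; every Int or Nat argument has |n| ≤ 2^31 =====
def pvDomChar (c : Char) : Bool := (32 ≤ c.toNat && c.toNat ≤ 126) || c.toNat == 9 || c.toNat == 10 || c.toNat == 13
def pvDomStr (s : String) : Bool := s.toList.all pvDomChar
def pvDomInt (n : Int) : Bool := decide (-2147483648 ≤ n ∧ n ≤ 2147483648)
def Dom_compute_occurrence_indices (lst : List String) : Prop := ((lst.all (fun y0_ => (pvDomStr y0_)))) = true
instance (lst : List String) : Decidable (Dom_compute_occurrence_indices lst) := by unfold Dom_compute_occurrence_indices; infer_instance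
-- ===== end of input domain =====

-- B replaces A's single interleaved count-and-append pass by a two-pass build-index-table-then-scatter
-- structure (same O(n) cost, different decomposition); return values proved equal on all inputs.


-- ===== PORT A =====
-- loop state: (lookup dict, ret); 'lookup[x]' after the branch always has the key, so getD is exact there
def compute_occurrence_indices (lst : List String) : List Int :=
  (lst.foldl
    (fun st x =>
      let lookup :=
        if st.1.contains x = false then st.1.insert x (0 : Int)
        else st.1.modify x 0 (fun v => v + 1)
      (lookup, st.2 ++ [lookup.getD x 0]))
    ((PySem.Dict.empty : PySem.Dict String Int), ([] : List Int))).2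

-- ===== PORT B =====
-- positions.setdefault(x, []).append(i) is Dict.modify x [] (· ++ [i]);
-- ret[i] = rank is List.set: i comes from enumerate, so 0 ≤ i < len ret and the assignment is exact there
def compute_occurrence_indices_alt (lst : List String) : List Int :=
  let positions := (PySem.List.enumerate lst 0).foldl
      (fun d p => d.modify p.2 [] (fun ixs => ixs ++ [p.1]))
      (PySem.Dict.empty : PySem.Dict String (List Int))
  let ret := List.replicate lst.length (0 : Int)
  positions.values.foldl
    (fun r poss => (PySem.List.enumerate poss 0).foldl
        (fun r q => r.set q.2.toNat q.1) r)
    ret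

-- ===== PRECONDITION & SPEC =====
def Spec_compute_occurrence_indices (lst : List String) (out : List Int) : Prop := out = compute_occurrence_indices_alt lst
instance (lst : List String) (out : List Int) : Decidable (Spec_compute_occurrence_indices lst out) := by unfold Spec_compute_occurrence_indices; infer_instance

-- ===== CLAIM (what is proved, stated in full; the proofs are below) =====
def Claim_equal_compute_occurrence_indices : Prop := ∀ (lst : List String), Dom_compute_occurrence_indices lst → Spec_compute_occurrence_indices lst (compute_occurrence_indices lst)

-- ===== LEMMAS AND PROOFS =====

-- A's loop body and loop, named for the proofs (definitionally the port's)
def aStep (st : PySem.Dict String Int × List Int) (x : String) : PySem.Dict String Int × List Int :=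
  let lookup :=
    if st.1.contains x = false then st.1.insert x (0 : Int)
    else st.1.modify x 0 (fun v => v + 1)
  (lookup, st.2 ++ [lookup.getD x 0])

def afold (lst : List String) : PySem.Dict String Int × List Int :=
  lst.foldl aStep (PySem.Dict.empty, [])

lemma aPort_eq (lst : List String) : compute_occurrence_indices lst = (afold lst).2 := rfl

lemma afold_append (l : List String) (x : String) :
    afold (l ++ [x]) = aStep (afold l) x := by
  simp [afold, List.foldl_append]

lemma afold_contains (l : List String) (v : String) :
    (afold l).1.contains v = decide (v ∈ l) := by
  induction l using List.reverseRecOn with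
  | nil => simp [afold, PySem.Dict.contains_empty]
  | append_singleton l y ih =>
      rw [afold_append]
      by_cases hy : (afold l).1.contains y = false <;>
        simp [aStep, hy, PySem.Dict.contains_insert, PySem.Dict.contains_modify, ih] <;>
        by_cases hvy : v = y <;> simp [hvy]

lemma count_append_singleton (l : List String) (y v : String) :
    ((l ++ [y]).count v : Int) = (l.count v : Int) + (if v = y then 1 else 0) := by
  by_cases h : v = y
  · subst h; simp [List.count_append]
  · have h0 : List.count v [y] = 0 := List.count_eq_zero.mpr (by simp [h])
    simp [List.count_append, h0, h]

lemma afold_getD (l : List String) (v : String) (hv : v ∈ l) :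
    (afold l).1.getD v 0 = (l.count v : Int) - 1 := by
  induction l using List.reverseRecOn with
  | nil => cases hv
  | append_singleton l y ih =>
      rw [afold_append]
      by_cases hy : y ∈ l
      · have hc : (afold l).1.contains y = true := by simp [afold_contains, hy]
        simp only [aStep, hc, Bool.true_eq_false, if_false]
        rw [PySem.Dict.getD_modify, count_append_singleton]
        by_cases hvy : v = y
        · subst hvy; rw [if_pos rfl, if_pos rfl, ih hy]; omega
        · have hvl : v ∈ l := by
            rcases List.mem_append.mp hv with h | h
            · exact h
            · exact absurd (by simpa using h) hvy
          rw [if_neg hvy, if_neg hvy, ih hvl]; omega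
      · have hc : (afold l).1.contains y = false := by simp [afold_contains, hy]
        simp only [aStep, hc, if_true]
        rw [PySem.Dict.getD_insert, count_append_singleton]
        by_cases hvy : v = y
        · subst hvy
          have h0 : l.count v = 0 := List.count_eq_zero.mpr hy
          rw [if_pos rfl, if_pos rfl, h0]; omega
        · have hvl : v ∈ l := by
            rcases List.mem_append.mp hv with h | h
            · exact h
            · exact absurd (by simpa using h) hvy
          rw [if_neg hvy, if_neg hvy, ih hvl]; omega

lemma A_snoc (l : List String) (x : String) :
    compute_occurrence_indices (l ++ [x]) = compute_occurrence_indices l ++ [(l.count x : Int)] := by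
  rw [aPort_eq, aPort_eq, afold_append]
  by_cases hx : x ∈ l
  · have hc : (afold l).1.contains x = true := by simp [afold_contains, hx]
    simp only [aStep, hc, Bool.true_eq_false, if_false]
    show (afold l).2 ++ [((afold l).1.modify x 0 (fun v => v + 1)).getD x 0]
        = (afold l).2 ++ [(l.count x : Int)]
    rw [PySem.Dict.getD_modify_self, afold_getD l x hx]
    congr 2
    omega
  · have hc : (afold l).1.contains x = false := by simp [afold_contains, hx]
    simp only [aStep, hc, if_true]
    show (afold l).2 ++ [((afold l).1.insert x 0).getD x 0]
        = (afold l).2 ++ [(l.count x : Int)]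
    rw [PySem.Dict.getD_insert_self, List.count_eq_zero.mpr hx]
    simp

-- B's pieces, named for the proofs (definitionally the port's)
def bStep (r : List Int) (q : Int × Int) : List Int := r.set q.2.toNat q.1

def sgroup (r : List Int) (g : List Int) : List Int :=
  (PySem.List.enumerate g 0).foldl bStep r

def build (lst : List String) : PySem.Dict String (List Int) :=
  (PySem.List.enumerate lst 0).foldl
    (fun d p => d.modify p.2 [] (fun ixs => ixs ++ [p.1])) PySem.Dict.empty

lemma bPort_eq (lst : List String) :
    compute_occurrence_indices_alt lst
      = (build lst).values.foldl sgroup (List.replicate lst.length (0 : Int)) := rfl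

lemma build_append (l : List String) (x : String) :
    build (l ++ [x]) = (build l).modify x [] (fun ixs => ixs ++ [(l.length : Int)]) := by
  simp [build, PySem.List.enumerate_append, List.foldl_append, PySem.List.enumerate_cons]

lemma build_keys (l : List String) : (build l).keys = PySem.Set.ofList l := by
  have h := PySem.Dict.keys_foldl_modify_key (PySem.List.enumerate l 0) (fun p => p.2)
    ([] : List Int) (fun _ p ixs => ixs ++ [p.1]) (PySem.Dict.empty)
  simpa [build, PySem.Dict.keys_empty, PySem.List.map_snd_enumerate,
    PySem.Set.update_nil_left] using h

lemma build_nodup_keys (l : List String) : (build l).keys.Nodup := by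
  rw [build_keys]; exact PySem.Set.nodup_ofList l

lemma build_getD_len (l : List String) (v : String) :
    ((build l).getD v []).length = l.count v := by
  induction l using List.reverseRecOn with
  | nil => simp [build, PySem.List.enumerate, PySem.Dict.getD_empty]
  | append_singleton l y ih =>
      rw [build_append, PySem.Dict.getD_modify]
      by_cases hvy : v = y
      · subst hvy
        simp [ih, List.count_append]
      · have h0 : List.count v [y] = 0 := List.count_eq_zero.mpr (by simp [hvy])
        simp [hvy, ih, List.count_append, h0]

lemma build_getD_bound (l : List String) (v : String) (i : Int) (hi : i ∈ (build l).getD v []) :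
    i.toNat < l.length := by
  induction l using List.reverseRecOn with
  | nil => simp [build, PySem.List.enumerate, PySem.Dict.getD_empty] at hi
  | append_singleton l y ih =>
      rw [build_append, PySem.Dict.getD_modify] at hi
      by_cases hvy : v = y
      · subst hvy
        rw [if_pos rfl] at hi
        rcases List.mem_append.mp hi with h | h
        · have := ih h; simp; omega
        · simp at h; subst h; simp
      · rw [if_neg hvy] at hi
        have := ih hi; simp; omega

lemma build_getD_not_mem (l : List String) (v : String) (hv : v ∉ l) :
    (build l).getD v [] = [] := by
  apply PySem.Dict.getD_of_not_contains
  rw [Bool.eq_false_iff]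
  intro hc
  exact hv (by simpa [build_keys, PySem.Set.mem_ofList] using
    (PySem.Dict.contains_iff_mem_keys _ _).mp hc)

-- scatter machinery: lengths are preserved and a never-written last cell commutes out
lemma foldl_bStep_length (ps : List (Int × Int)) (r : List Int) :
    (ps.foldl bStep r).length = r.length := by
  induction ps generalizing r with
  | nil => rfl
  | cons q ps ih => simp [bStep, ih]

lemma sgroup_length (r g : List Int) : (sgroup r g).length = r.length :=
  foldl_bStep_length _ _

lemma foldl_sgroup_length (gs : List (List Int)) (r : List Int) :
    (gs.foldl sgroup r).length = r.length := by
  induction gs generalizing r with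
  | nil => rfl
  | cons g gs ih => simp [ih, sgroup_length]

lemma foldl_bStep_append (ps : List (Int × Int)) (ys : List Int) (c : Int)
    (h : ∀ q ∈ ps, q.2.toNat < ys.length) :
    ps.foldl bStep (ys ++ [c]) = ps.foldl bStep ys ++ [c] := by
  induction ps generalizing ys with
  | nil => rfl
  | cons q ps ih =>
      have hq := h q (List.mem_cons_self ..)
      have hstep : bStep (ys ++ [c]) q = bStep ys q ++ [c] := by
        simp [bStep, hq]
      rw [List.foldl_cons, List.foldl_cons, hstep, ih]
      intro q' hq'
      have := h q' (List.mem_cons_of_mem _ hq')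
      simpa [bStep] using this

lemma sgroup_append (g : List Int) (ys : List Int) (c : Int)
    (h : ∀ i ∈ g, i.toNat < ys.length) :
    sgroup (ys ++ [c]) g = sgroup ys g ++ [c] := by
  apply foldl_bStep_append
  intro q hq
  rcases (PySem.List.mem_enumerate_iff g 0 q).mp hq with ⟨k, hk, rfl⟩
  exact h _ (g.getElem_mem hk)

lemma foldl_sgroup_append (gs : List (List Int)) (ys : List Int) (c : Int)
    (h : ∀ g ∈ gs, ∀ i ∈ g, i.toNat < ys.length) :
    gs.foldl sgroup (ys ++ [c]) = gs.foldl sgroup ys ++ [c] := by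
  induction gs generalizing ys with
  | nil => rfl
  | cons g gs ih =>
      rw [List.foldl_cons, List.foldl_cons,
        sgroup_append g ys c (h g (List.mem_cons_self ..)), ih]
      intro g' hg' i hi
      have := h g' (List.mem_cons_of_mem _ hg') i hi
      simpa [sgroup_length] using this

lemma sgroup_snoc (r g : List Int) (m : Int) :
    sgroup r (g ++ [m]) = (sgroup r g).set m.toNat (g.length : Int) := by
  simp [sgroup, PySem.List.enumerate_append, List.foldl_append, PySem.List.enumerate_cons, bStep]

lemma set_last (ys : List Int) (c v : Int) :
    (ys ++ [c]).set ys.length v = ys ++ [v] := by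
  simp

lemma B_snoc (l : List String) (x : String) :
    compute_occurrence_indices_alt (l ++ [x])
      = compute_occurrence_indices_alt l ++ [(l.count x : Int)] := by
  rw [bPort_eq, bPort_eq, build_append]
  have hrep : List.replicate (l ++ [x]).length (0 : Int)
      = List.replicate l.length (0 : Int) ++ [0] := by
    simp [List.replicate_succ']
  set n := l.length with hn
  set base := List.replicate n (0 : Int) with hbase
  have hbaselen : base.length = n := by simp [hbase]
  have hbound : ∀ gs : List (List Int), (∀ g ∈ gs, ∃ v, g = (build l).getD v []) →
      ∀ (r : List Int), r.length = n →
      ∀ g ∈ gs, ∀ i ∈ g, i.toNat < r.length := by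
    intro gs hgs r hr g hg i hi
    rcases hgs g hg with ⟨v, rfl⟩
    rw [hr]; exact build_getD_bound l v i hi
  by_cases hx : x ∈ l
  · -- x already has a group: it gains the new index, the other groups are unchanged
    have hc : (build l).contains x = true := by
      rw [PySem.Dict.contains_iff_mem_keys, build_keys, PySem.Set.mem_ofList]; exact hx
    have hkeys : ((build l).modify x [] (fun ixs => ixs ++ [(n : Int)])).keys
        = (build l).keys := by
      rw [PySem.Dict.keys_modify, PySem.Dict.keys_insert_of_contains _ _ hc]
    obtain ⟨K1, K2, hK⟩ := List.append_of_mem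
      (show x ∈ (build l).keys by rw [build_keys, PySem.Set.mem_ofList]; exact hx)
    have hnd := build_nodup_keys l
    rw [hK] at hnd
    obtain ⟨nd1, nd2, disj⟩ := List.nodup_append.mp hnd
    have hx2 : x ∉ K2 := (List.nodup_cons.mp nd2).1
    have hx1 : x ∉ K1 := fun h => disj x h x (List.mem_cons_self ..) rfl
    have hvals' : ((build l).modify x [] (fun ixs => ixs ++ [(n : Int)])).values
        = K1.map (fun v => (build l).getD v [])
          ++ ((build l).getD x [] ++ [(n : Int)])
          :: K2.map (fun v => (build l).getD v []) := by
      rw [PySem.Dict.values_eq_map_keys _ (by rw [hkeys, hK]; exact hnd) [],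
        hkeys, hK, List.map_append, List.map_cons]
      congr 1
      · apply List.map_congr_left
        intro v hv
        exact PySem.Dict.getD_modify_of_ne _ _ _ (fun (h : v = x) => hx1 (h ▸ hv))
      · congr 1
        · exact PySem.Dict.getD_modify_self _ _ _ _
        · apply List.map_congr_left
          intro v hv
          exact PySem.Dict.getD_modify_of_ne _ _ _ (fun (h : v = x) => hx2 (h ▸ hv))
    have hvals : (build l).values
        = K1.map (fun v => (build l).getD v [])
          ++ (build l).getD x [] :: K2.map (fun v => (build l).getD v []) := by
      rw [PySem.Dict.values_eq_map_keys _ (by rw [hK]; exact hnd) [], hK,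
        List.map_append, List.map_cons]
    rw [hvals', hvals, hrep, List.foldl_append, List.foldl_cons,
      List.foldl_append, List.foldl_cons]
    have hmem1 : ∀ g ∈ K1.map (fun v => (build l).getD v []), ∃ v, g = (build l).getD v [] := by
      intro g hg; rcases List.mem_map.mp hg with ⟨v, _, rfl⟩; exact ⟨v, rfl⟩
    have hmem2 : ∀ g ∈ K2.map (fun v => (build l).getD v []), ∃ v, g = (build l).getD v [] := by
      intro g hg; rcases List.mem_map.mp hg with ⟨v, _, rfl⟩; exact ⟨v, rfl⟩
    rw [foldl_sgroup_append _ base 0 (hbound _ hmem1 base hbaselen)]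
    set r1 := (K1.map (fun v => (build l).getD v [])).foldl sgroup base with hr1
    have hr1len : r1.length = n := by rw [hr1, foldl_sgroup_length, hbaselen]
    rw [sgroup_snoc, sgroup_append _ r1 0
      (by intro i hi; rw [hr1len]; exact build_getD_bound l x i hi)]
    have hslen : (sgroup r1 ((build l).getD x [])).length = n := by
      rw [sgroup_length, hr1len]
    have : ((n : Int)).toNat = (sgroup r1 ((build l).getD x [])).length := by
      rw [hslen]; simp
    rw [this, set_last, build_getD_len l x]
    exact foldl_sgroup_append _ _ _
      (hbound _ hmem2 _ (by rw [sgroup_length, hr1len]))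
  · -- x is a new key: its fresh group [n] is appended after all existing groups
    have hc : (build l).contains x = false := by
      rw [Bool.eq_false_iff]
      intro h
      exact hx (by simpa [build_keys, PySem.Set.mem_ofList] using
        (PySem.Dict.contains_iff_mem_keys _ _).mp h)
    have hkeys : ((build l).modify x [] (fun ixs => ixs ++ [(n : Int)])).keys
        = (build l).keys ++ [x] := by
      rw [PySem.Dict.keys_modify, PySem.Dict.keys_insert_of_not_contains _ _ hc]
    have hndk := build_nodup_keys l
    have hxk : x ∉ (build l).keys := by
      rw [build_keys, PySem.Set.mem_ofList]; exact hx
    have hnd' : ((build l).keys ++ [x]).Nodup := by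
      rw [List.nodup_append]
      refine ⟨hndk, List.nodup_singleton x, ?_⟩
      intro a ha b hb hab
      simp at hb
      exact hxk ((hab.trans hb) ▸ ha)
    have hvals' : ((build l).modify x [] (fun ixs => ixs ++ [(n : Int)])).values
        = (build l).keys.map (fun v => (build l).getD v []) ++ [[(n : Int)]] := by
      rw [PySem.Dict.values_eq_map_keys _ (by rw [hkeys]; exact hnd') [],
        hkeys, List.map_append, List.map_singleton]
      congr 1
      · apply List.map_congr_left
        intro v hv
        exact PySem.Dict.getD_modify_of_ne _ _ _ (fun (h : v = x) => hxk (h ▸ hv))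
      · rw [PySem.Dict.getD_modify_self, build_getD_not_mem l x hx]
        simp
    have hvals : (build l).values = (build l).keys.map (fun v => (build l).getD v []) :=
      PySem.Dict.values_eq_map_keys _ hndk []
    have hmem : ∀ g ∈ (build l).keys.map (fun v => (build l).getD v []),
        ∃ v, g = (build l).getD v [] := by
      intro g hg; rcases List.mem_map.mp hg with ⟨v, _, rfl⟩; exact ⟨v, rfl⟩
    rw [hvals', hrep, List.foldl_append,
      foldl_sgroup_append _ base 0 (hbound _ hmem base hbaselen), ← hvals]
    set r1 := (build l).values.foldl sgroup base with hr1
    have hr1len : r1.length = n := by rw [hr1, foldl_sgroup_length, hbaselen]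
    have hsg : sgroup (r1 ++ [0]) [(n : Int)] = (r1 ++ [0]).set ((n : Int)).toNat 0 := by
      simp [sgroup, PySem.List.enumerate, bStep]
    rw [List.foldl_cons, List.foldl_nil, hsg]
    have : ((n : Int)).toNat = r1.length := by rw [hr1len]; simp
    rw [this, set_last, List.count_eq_zero.mpr hx]
    simp

lemma AB_eq (l : List String) :
    compute_occurrence_indices l = compute_occurrence_indices_alt l := by
  induction l using List.reverseRecOn with
  | nil => rfl
  | append_singleton l x ih => rw [A_snoc, B_snoc, ih]

-- ===== VERDICT (by name: the statement is the Claim_ definition above) =====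
theorem compute_occurrence_indices_spec : Claim_equal_compute_occurrence_indices := by
  intro lst _
  unfold Spec_compute_occurrence_indices
  exact AB_eq lst
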